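-- pv_equiv track=rewrite | github.com/bajuwa/DragonSlayer | libv0_0.py | bufferColumn
-- ===== SOURCE A (Python) =====
-- import math
--
-- def bufferDrawingCenter(drawing, targetWidth, targetHeight):
--     #create a new blank list to return as a modified drawing
--     newDrawing = drawing[:]
--     #if given an empty drawing, generate a blank drawing
--     if len(newDrawing) == 0:
--         for i in range(0, targetHeight):
--             newDrawing.append(" " * targetWidth)
--     else:
--         # fix height
--         while len(newDrawing) < targetHeight:
--             newDrawing.insert(0, "")
--             if len(newDrawing) < targetHeight:
--                 newDrawing.append("")
--         if len(newDrawing) > targetHeight: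
--             topClipping = math.floor((len(newDrawing)-targetHeight)/2)
--             bottomClipping = math.ceil((len(newDrawing)-targetHeight)/2)
--             newDrawing = newDrawing[topClipping:-bottomClipping]
--
--         # fix width
--         for i in range(0, len(newDrawing)):
--             if len(newDrawing[i]) < targetWidth:
--                 newDrawing[i] = (" " * math.floor((targetWidth-len(newDrawing[i]))/2)) \
--                                 + newDrawing[i] \
--                                 + (" " * math.ceil((targetWidth-len(newDrawing[i]))/2))
--             else:
--                 sample = newDrawing[i]
--                 clipping = int((len(sample)-targetWidth)/2)
--                 newDrawing[i] = sample[clipping:len(sample)-clipping]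
--
--     return newDrawing
--
-- def bufferDrawingBasic(drawing):
--     #find the target widths and height for minimal whitespace
--     height = len(drawing)
--
--     #generate a list of all widths, then pick the max width
--     widthList = []
--     for i in range(0, len(drawing)):
--         widthList.append(len(drawing[i]))
--     width = max(widthList)
--
--     #pass new arguments into proper buffering function and return picture
--     return bufferDrawingCenter(drawing, width, height)
--
-- def bufferColumn(drawings):
--
--     #get the width of each buffered drawing as a list
--     widthOfDrawings = []
--     for i in range(0, len(drawings)):
--         sampleDrawing = bufferDrawingBasic(drawings[i])
--         widthOfDrawings.append(len(sampleDrawing[0]))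
--
--     #buffer each image to the same width and combine
--     bufferedDrawing = []
--     for j in range(0, len(drawings)):
--         bufferedDrawing += bufferDrawingCenter(drawings[j], max(widthOfDrawings), len(drawings[j]))
--
--     return bufferedDrawing
-- ===== SOURCE B (Python) =====
-- def bufferColumn(drawings):
--     # One flat pass: no per-drawing re-buffering; every line is at most the
--     # global max width, so only center-padding (floor-left, ceil-right) is needed.
--     if not drawings:
--         return []
--     W = max(len(line) for d in drawings for line in d)
--     out = []
--     for d in drawings:
--         for line in d:
--             p = W - len(line)
--             out.append(" " * (p // 2) + line + " " * (p - p // 2))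
--     return out
-- ===== Notes on version B (the rewrite author's own statement) =====
-- stated objective: simpler
-- what changed: Replaces the two-phase pipeline (buffer each drawing individually via bufferDrawingBasic/bufferDrawingCenter, measure the results, then re-buffer every drawing) by one flat pass: compute the global max line width directly and center-pad each line exactly once; the height-fixing and clipping machinery disappears because each call uses the drawing's own height and no line exceeds the global width.
import Mathlib
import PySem

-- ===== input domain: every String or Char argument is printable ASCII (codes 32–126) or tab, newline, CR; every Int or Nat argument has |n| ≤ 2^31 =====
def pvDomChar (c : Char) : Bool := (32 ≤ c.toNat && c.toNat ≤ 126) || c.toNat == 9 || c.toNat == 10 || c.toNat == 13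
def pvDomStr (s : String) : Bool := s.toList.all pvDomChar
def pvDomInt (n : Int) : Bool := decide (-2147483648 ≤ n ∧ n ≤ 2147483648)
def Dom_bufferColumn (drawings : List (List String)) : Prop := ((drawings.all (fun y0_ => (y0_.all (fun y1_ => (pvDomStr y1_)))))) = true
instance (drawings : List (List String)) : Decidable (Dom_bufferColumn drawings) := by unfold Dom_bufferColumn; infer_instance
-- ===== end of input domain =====

-- B flattens A's buffer-measure-rebuffer pipeline into one pass that pads every
-- line to the global max width (objective: simpler; return value only, A never
-- mutates its argument).

-- ===== PORT A =====

-- " " * n  (n ≥ 0 at every call site); Python string repetition/concatenation is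
-- ported on the char-list side per the PySem convention.
def pvSpaces (n : Int) : String := String.ofList (List.replicate n.toNat ' ')

-- the `while len(newDrawing) < targetHeight` loop of bufferDrawingCenter
def pvFixHeight (l : List String) (t : Int) : List String :=
  if ((l.length : Int) < t) then
    pvFixHeight (if ((("" :: l).length : Int) < t) then ("" :: l) ++ [""] else "" :: l) t
  else l
termination_by (t - l.length).toNat
decreasing_by split <;> simp <;> omega

-- the body of bufferDrawingCenter's width-fixing `for` loop (it rewrites each
-- element of the list independently, hence a map below);
-- math.floor(x/2) = x // 2 and math.ceil(x/2) = -((-x) // 2) exactly (the int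
-- operands here are far below 2^53, so the float division is exact);
-- int((len-w)/2) truncates, which equals floor since len-w ≥ 0 in that branch.
def pvFixWidthLine (targetWidth : Int) (s : String) : String :=
  if (PySem.Str.len s : Int) < targetWidth then
    String.ofList
      (List.replicate (PySem.Int.floordiv (targetWidth - PySem.Str.len s) 2).toNat ' '
        ++ s.toList
        ++ List.replicate (-(PySem.Int.floordiv (-(targetWidth - PySem.Str.len s)) 2)).toNat ' ')
  else
    let clipping := PySem.Int.floordiv ((PySem.Str.len s : Int) - targetWidth) 2
    PySem.Str.slice s (some clipping) (some ((PySem.Str.len s : Int) - clipping))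

def pvBufferDrawingCenter (drawing : List String) (targetWidth targetHeight : Int) : List String :=
  if drawing.length = 0 then
    (PySem.List.pyRange 0 targetHeight 1).foldl (fun acc _ => acc ++ [pvSpaces targetWidth]) drawing
  else
    let nd := pvFixHeight drawing targetHeight
    let nd := if (nd.length : Int) > targetHeight then
        let top := PySem.Int.floordiv ((nd.length : Int) - targetHeight) 2
        let bottom := -(PySem.Int.floordiv (-((nd.length : Int) - targetHeight)) 2)
        PySem.List.slice nd (some top) (some (-bottom))
      else nd
    nd.map (pvFixWidthLine targetWidth)

def pvBufferDrawingBasic (drawing : List String) : List String :=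
  let widthList := drawing.foldl (fun acc s => acc ++ [(PySem.Str.len s : Int)]) []
  -- Python raises ValueError on `max(widthList)` when drawing == []; excluded by Pre_
  let width := ((PySem.List.max? widthList (fun x => x)).getD 0)
  pvBufferDrawingCenter drawing width (drawing.length : Int)

def bufferColumn (drawings : List (List String)) : List String :=
  let widthOfDrawings := drawings.foldl (fun acc d =>
      let sampleDrawing := pvBufferDrawingBasic d
      -- sampleDrawing[0]: in range whenever d ≠ [] (guaranteed under Pre_)
      acc ++ [(PySem.Str.len ((PySem.List.pyGet? sampleDrawing 0).getD "") : Int)]) []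
  drawings.foldl (fun acc d =>
      acc ++ pvBufferDrawingCenter d ((PySem.List.max? widthOfDrawings (fun x => x)).getD 0)
        (d.length : Int)) []

-- ===== PORT B =====

-- B's `" " * (p // 2) + line + " " * (p - p // 2)`
def pvPadLine (W : Int) (line : String) : String :=
  let p := W - PySem.Str.len line
  String.ofList
    (List.replicate (PySem.Int.floordiv p 2).toNat ' '
      ++ line.toList
      ++ List.replicate (p - PySem.Int.floordiv p 2).toNat ' ')

def bufferColumn_alt (drawings : List (List String)) : List String :=
  if drawings = [] then []
  else
    -- max(len(line) for d in drawings for line in d); ValueError when empty — excluded by Pre_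
    let W := (PySem.List.max?
        (drawings.flatMap (fun d => d.map (fun line => (PySem.Str.len line : Int))))
        (fun x => x)).getD 0
    drawings.flatMap (fun d => d.map (pvPadLine W))

-- ===== PRECONDITION & SPEC =====
-- Pre_ excludes inputs with an empty sub-drawing, on which A raises ValueError
-- (max() of the empty per-line width list).
def Pre_bufferColumn (drawings : List (List String)) : Prop := ∀ d ∈ drawings, d ≠ []
instance (drawings : List (List String)) : Decidable (Pre_bufferColumn drawings) := by
  unfold Pre_bufferColumn; infer_instance

def pvWitness_bufferColumn : List (List String) := [["ab", "c"], ["#"]]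

def Spec_bufferColumn (drawings : List (List String)) (out : List String) : Prop :=
  out = bufferColumn_alt drawings
instance (drawings : List (List String)) (out : List String) : Decidable (Spec_bufferColumn drawings out) := by
  unfold Spec_bufferColumn; infer_instance

-- ===== CLAIM (what is proved, stated in full; the proofs are below) =====
def Claim_equal_bufferColumn : Prop := ∀ (drawings : List (List String)),
  Dom_bufferColumn drawings → Pre_bufferColumn drawings →
    Spec_bufferColumn drawings (bufferColumn drawings)

-- ===== LEMMAS AND PROOFS =====

theorem pvFixHeight_of_le (l : List String) (t : Int) (h : t ≤ (l.length : Int)) :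
    pvFixHeight l t = l := by
  rw [pvFixHeight]
  simp [not_lt.mpr h]

-- proof-only helpers: a drawing's line widths and its max width (A's per-drawing width)
def pvLens (d : List String) : List Int := d.map (fun s => (PySem.Str.len s : Int))
def pvW (d : List String) : Int := (PySem.List.max? (pvLens d) (fun x => x)).getD 0

theorem le_maxD (xs : List Int) (x : Int) (hx : x ∈ xs) :
    x ≤ (PySem.List.max? xs (fun y => y)).getD 0 := by
  cases hmax : PySem.List.max? xs (fun y => y) with
  | none =>
      rw [PySem.List.max?_eq_none_iff] at hmax
      simp [hmax] at hx
  | some m => simpa using PySem.List.max?_isMax hmax _ hx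

theorem le_pvW (d : List String) (s : String) (hs : s ∈ d) :
    (PySem.Str.len s : Int) ≤ pvW d :=
  le_maxD _ _ (List.mem_map_of_mem hs)

theorem slice_len_self (s : String) :
    PySem.Str.slice s (some 0) (some ((PySem.Str.len s : Int) - 0)) = s := by
  have h : (PySem.Str.slice s (some 0) (some ((PySem.Str.len s : Int) - 0))).toList
      = s.toList := by
    simp [pysem, PySem.List.slice_to_natCast]
  simpa only [String.ofList_toList] using congrArg String.ofList h

theorem pvPad_eq_fix (W : Int) (s : String) (h : (PySem.Str.len s : Int) ≤ W) :
    pvFixWidthLine W s = pvPadLine W s := by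
  unfold pvFixWidthLine pvPadLine
  by_cases hlt : (PySem.Str.len s : Int) < W
  · have hceil : -(PySem.Int.floordiv (-(W - (PySem.Str.len s : Int))) 2)
        = (W - (PySem.Str.len s : Int)) - PySem.Int.floordiv (W - (PySem.Str.len s : Int)) 2 := by
      rw [PySem.Int.floordiv_eq_ediv_of_pos (by omega), PySem.Int.floordiv_eq_ediv_of_pos (by omega)]
      omega
    simp only [if_pos hlt, hceil]
  · have heq : (PySem.Str.len s : Int) = W := le_antisymm h (not_lt.mp hlt)
    simp only [← heq]
    rw [show PySem.Int.floordiv ((PySem.Str.len s : Int) - (PySem.Str.len s : Int)) 2 = 0 by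
      rw [PySem.Int.floordiv_eq_ediv_of_pos (by omega)]; omega]
    rw [slice_len_self]
    rw [show (PySem.Str.len s : Int) - (PySem.Str.len s : Int) = 0 by omega]
    simp [String.ofList_toList]

theorem pvFix_len (W : Int) (s : String) (h : (PySem.Str.len s : Int) ≤ W) :
    ((PySem.Str.len (pvFixWidthLine W s)) : Int) = W := by
  rw [pvPad_eq_fix W s h]
  simp only [pvPadLine, PySem.Str.len_eq, String.toList_ofList, List.length_append,
    List.length_replicate]
  rw [PySem.Int.floordiv_eq_ediv_of_pos (show (0:Int) < 2 by omega)]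
  simp only [PySem.Str.len_eq] at h
  omega

theorem center_self (d : List String) (hd : d ≠ []) (W : Int) :
    pvBufferDrawingCenter d W (d.length : Int) = d.map (pvFixWidthLine W) := by
  unfold pvBufferDrawingCenter
  rw [if_neg (by simpa using hd)]
  rw [pvFixHeight_of_le d _ (le_refl _)]
  simp

theorem basic_eq (d : List String) (hd : d ≠ []) :
    pvBufferDrawingBasic d = d.map (pvFixWidthLine (pvW d)) := by
  unfold pvBufferDrawingBasic
  rw [PySem.List.foldl_append_singleton_eq_map, List.nil_append]
  exact center_self d hd _

theorem width_of_basic (d : List String) (hd : d ≠ []) :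
    (PySem.Str.len ((PySem.List.pyGet? (pvBufferDrawingBasic d) 0).getD "") : Int) = pvW d := by
  obtain ⟨s, rest, rfl⟩ := List.exists_cons_of_ne_nil hd
  rw [basic_eq _ hd]
  simp only [List.map_cons]
  rw [show (PySem.List.pyGet? (pvFixWidthLine (pvW (s :: rest)) s :: rest.map (pvFixWidthLine (pvW (s :: rest)))) 0
      = some (pvFixWidthLine (pvW (s :: rest)) s)) from by simp [pysem]]
  exact pvFix_len _ _ (le_pvW _ _ (List.mem_cons_self ..))

theorem pvW_flat (drawings : List (List String)) (h0 : drawings ≠ [])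
    (h : ∀ d ∈ drawings, d ≠ []) :
    (PySem.List.max? (drawings.map pvW) (fun x => x)).getD 0
      = (PySem.List.max?
          (drawings.flatMap (fun d => d.map (fun line => (PySem.Str.len line : Int))))
          (fun x => x)).getD 0 := by
  cases hA : PySem.List.max? (drawings.map pvW) (fun x => x) with
  | none =>
      rw [PySem.List.max?_eq_none_iff, List.map_eq_nil_iff] at hA
      exact absurd hA h0
  | some mA =>
  cases hB : PySem.List.max?
      (drawings.flatMap (fun d => d.map (fun line => (PySem.Str.len line : Int)))) (fun x => x) with
  | none =>
      rw [PySem.List.max?_eq_none_iff, List.flatMap_eq_nil_iff] at hB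
      obtain ⟨d0, hd0⟩ := List.exists_mem_of_ne_nil drawings h0
      have hnil := hB _ hd0
      rw [List.map_eq_nil_iff] at hnil
      exact absurd hnil (h _ hd0)
  | some mB =>
  simp only [Option.getD_some]
  have hAmem := PySem.List.max?_mem hA
  obtain ⟨d0, hd0, rfl⟩ := List.mem_map.mp hAmem
  have hWmem : pvW d0 ∈ pvLens d0 := by
    unfold pvW
    cases hm : PySem.List.max? (pvLens d0) (fun x => x) with
    | none =>
        rw [PySem.List.max?_eq_none_iff] at hm
        exact absurd (by simpa [pvLens, List.map_eq_nil_iff] using hm) (h _ hd0)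
    | some m => simpa using PySem.List.max?_mem hm
  have h1 : pvW d0 ≤ mB := by
    obtain ⟨s, hs, hsl⟩ := List.mem_map.mp hWmem
    have hmem : (PySem.Str.len s : Int) ∈
        drawings.flatMap (fun d => d.map (fun line => (PySem.Str.len line : Int))) :=
      List.mem_flatMap.mpr ⟨d0, hd0, List.mem_map_of_mem hs⟩
    have h' : (PySem.Str.len s : Int) ≤ mB := PySem.List.max?_isMax hB _ hmem
    exact le_of_eq_of_le hsl.symm h'
  have h2 : mB ≤ pvW d0 := by
    have hBmem := PySem.List.max?_mem hB
    obtain ⟨d1, hd1, hmem1⟩ := List.mem_flatMap.mp hBmem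
    obtain ⟨s1, hs1, rfl⟩ := List.mem_map.mp hmem1
    calc (PySem.Str.len s1 : Int) ≤ pvW d1 := le_pvW _ _ hs1
      _ ≤ pvW d0 := PySem.List.max?_isMax hA _ (List.mem_map_of_mem hd1)
  omega

theorem bufferColumn_spec : Claim_equal_bufferColumn := by
  intro drawings _ hpre
  unfold Spec_bufferColumn bufferColumn bufferColumn_alt
  by_cases h0 : drawings = []
  · subst h0; simp
  · rw [if_neg h0]
    rw [show drawings.foldl (fun acc d =>
        acc ++ [(PySem.Str.len ((PySem.List.pyGet? (pvBufferDrawingBasic d) 0).getD "") : Int)]) []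
        = drawings.map pvW from by
      rw [PySem.List.foldl_append_singleton_eq_map, List.nil_append]
      exact List.map_congr_left fun d hd => width_of_basic d (hpre d hd)]
    rw [PySem.List.foldl_append_eq_flatMap, List.nil_append]
    rw [← pvW_flat drawings h0 hpre]
    refine List.flatMap_congr fun d hd => ?_
    rw [center_self d (hpre d hd) _]
    refine List.map_congr_left fun line hline => ?_
    refine pvPad_eq_fix _ _ ?_
    exact le_trans (le_pvW d line hline) (le_maxD _ _ (List.mem_map_of_mem hd))
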